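-- pv_equiv track=rewrite | github.com/mihirmirajkar/interview-prep | problems/process_batches_with_memory/batch_processing_optimization.py | get_optimal_batches
-- ===== SOURCE A (Python) =====
-- from typing import List, Tuple
--
-- def get_optimal_batches(data_points: List[Tuple[int, int]],
--                        max_memory: int, batch_overhead: int) -> List[List[Tuple[int, int]]]:
--     """
--     Return the actual optimal batching strategy.
--
--     Args:
--         data_points: List of (processing_cost, memory_requirement) tuples
--         max_memory: Maximum memory allowed per batch
--         batch_overhead: Fixed time cost added to each batch
--
--     Returns:
--         List of batches, where each batch is a list of data points
--
--     TODO: Implement this method (bonus points)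
--     """
--     # YOUR IMPLEMENTATION HERE
--     data_points = sorted(data_points, key=lambda x: x[0], reverse=True)
--     processed = [False]*len(data_points)
--
--     batches = []
--     for i, (cost, memory) in enumerate(data_points):
--         if processed[i]:
--             continue
--         processed[i] = True
--         # processing_time += batch_overhead + cost
--         current_batch = [(cost, memory)]
--         current_batch_memory = memory
--
--         for j in range(i, len(data_points)):
--             if processed[j]:
--                 continue
--             cost2, memory2 = data_points[j]
--             if current_batch_memory + memory2 > max_memory:
--                 break
--             processed[j] = True
--             current_batch.append(data_points[j])
--             current_batch_memory += memory2
--         batches.append(current_batch)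
--     return batches
-- ===== SOURCE B (Python) =====
-- from typing import List, Tuple
--
-- def get_optimal_batches(data_points: List[Tuple[int, int]],
--                         max_memory: int, batch_overhead: int) -> List[List[Tuple[int, int]]]:
--     batches = []
--     current_batch = []
--     current_memory = 0
--     for point in sorted(data_points, key=lambda x: x[0], reverse=True):
--         cost, memory = point
--         if not current_batch:
--             current_batch = [point]
--             current_memory = memory
--         elif current_memory + memory <= max_memory:
--             current_batch.append(point)
--             current_memory += memory
--         else:
--             batches.append(current_batch)
--             current_batch = [point]
--             current_memory = memory
--     if current_batch:
--         batches.append(current_batch)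
--     return batches
-- ===== Notes on version B (the rewrite author's own statement) =====
-- stated objective: simpler
-- what changed: Replaced the processed-flag array and the nested index loop with a single linear pass over the sorted list that maintains only the current batch and its memory, flushing on overflow.
import Mathlib
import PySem

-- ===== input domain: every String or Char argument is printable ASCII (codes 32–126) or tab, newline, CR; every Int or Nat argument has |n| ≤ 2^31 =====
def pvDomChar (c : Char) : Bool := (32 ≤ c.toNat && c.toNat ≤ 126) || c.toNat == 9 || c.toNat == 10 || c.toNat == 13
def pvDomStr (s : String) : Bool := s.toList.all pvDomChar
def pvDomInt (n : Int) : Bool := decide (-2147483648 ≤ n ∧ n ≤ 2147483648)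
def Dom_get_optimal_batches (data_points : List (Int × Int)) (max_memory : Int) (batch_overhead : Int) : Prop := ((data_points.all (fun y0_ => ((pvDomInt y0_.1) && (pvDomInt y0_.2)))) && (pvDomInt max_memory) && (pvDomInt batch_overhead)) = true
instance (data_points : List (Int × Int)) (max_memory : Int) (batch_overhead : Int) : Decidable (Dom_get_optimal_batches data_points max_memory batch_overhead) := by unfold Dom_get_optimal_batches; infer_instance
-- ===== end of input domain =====

-- B replaces A's processed-flag array and nested index loop by one linear accumulator pass
-- over the same sorted list (same return value; objective: simpler).

-- ===== PORT A =====
-- inner 'for j in range(i, len(data_points))' loop: state (processed, current_batch, current_batch_memory)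
-- (indices are always in range in the Python, so list reads use getD; exact there)
def pvInnerA (xs : List (Int × Int)) (max_memory : Int) (n j : Nat)
    (processed : List Bool) (batch : List (Int × Int)) (mem : Int) :
    List Bool × List (Int × Int) × Int :=
  if _h : j < n then
    if processed.getD j false then
      pvInnerA xs max_memory n (j+1) processed batch mem          -- continue
    else
      let p := xs.getD j (0, 0)
      if mem + p.2 > max_memory then (processed, batch, mem)      -- break
      else pvInnerA xs max_memory n (j+1) (processed.set j true) (batch ++ [p]) (mem + p.2)
  else (processed, batch, mem)
termination_by n - j

-- outer 'for i, (cost, memory) in enumerate(data_points)' loop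
def pvOuterA (xs : List (Int × Int)) (max_memory : Int) (n i : Nat)
    (processed : List Bool) (batches : List (List (Int × Int))) : List (List (Int × Int)) :=
  if _h : i < n then
    if processed.getD i false then
      pvOuterA xs max_memory n (i+1) processed batches            -- continue
    else
      let p := xs.getD i (0, 0)
      let r := pvInnerA xs max_memory n i (processed.set i true) [p] p.2
      pvOuterA xs max_memory n (i+1) r.1 (batches ++ [r.2.1])
  else batches
termination_by n - i

def get_optimal_batches (data_points : List (Int × Int)) (max_memory : Int) (_batch_overhead : Int) : List (List (Int × Int)) :=
  let xs := PySem.List.sorted data_points (fun x => x.1) true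
  pvOuterA xs max_memory xs.length 0 (List.replicate xs.length false) []

-- ===== PORT B =====
-- B's single loop; state (batches, current_batch, current_memory)
def pvLoopB (max_memory : Int) : List (Int × Int) → List (List (Int × Int)) → List (Int × Int) → Int →
    List (List (Int × Int)) × List (Int × Int) × Int
  | [], batches, cur, mem => (batches, cur, mem)
  | p :: t, batches, cur, mem =>
    if cur.isEmpty then pvLoopB max_memory t batches [p] p.2
    else if mem + p.2 ≤ max_memory then pvLoopB max_memory t batches (cur ++ [p]) (mem + p.2)
    else pvLoopB max_memory t (batches ++ [cur]) [p] p.2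

def get_optimal_batches_alt (data_points : List (Int × Int)) (max_memory : Int) (_batch_overhead : Int) : List (List (Int × Int)) :=
  let r := pvLoopB max_memory (PySem.List.sorted data_points (fun x => x.1) true) [] [] 0
  if r.2.1.isEmpty then r.1 else r.1 ++ [r.2.1]   -- final 'if current_batch: batches.append(...)'

-- ===== PRECONDITION & SPEC =====
def Spec_get_optimal_batches (data_points : List (Int × Int)) (max_memory : Int) (batch_overhead : Int) (out : List (List (Int × Int))) : Prop := out = get_optimal_batches_alt data_points max_memory batch_overhead
instance (data_points : List (Int × Int)) (max_memory : Int) (batch_overhead : Int) (out : List (List (Int × Int))) : Decidable (Spec_get_optimal_batches data_points max_memory batch_overhead out) := by unfold Spec_get_optimal_batches; infer_instance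

-- ===== CLAIM (what is proved, stated in full; the proofs are below) =====
def Claim_equal_get_optimal_batches : Prop := ∀ (data_points : List (Int × Int)) (max_memory : Int) (batch_overhead : Int), Dom_get_optimal_batches data_points max_memory batch_overhead → Spec_get_optimal_batches data_points max_memory batch_overhead (get_optimal_batches data_points max_memory batch_overhead)

-- ===== LEMMAS AND PROOFS =====

-- common abstraction: 'chunk' takes the longest prefix that keeps fitting, 'greedy' the batch list
def pvChunk (mm mem : Int) : List (Int × Int) → List (Int × Int) × List (Int × Int)
  | [] => ([], [])
  | p :: t =>
    if mem + p.2 > mm then ([], p :: t)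
    else
      let r := pvChunk mm (mem + p.2) t
      (p :: r.1, r.2)

theorem pvChunk_append (mm mem : Int) (l : List (Int × Int)) :
    (pvChunk mm mem l).1 ++ (pvChunk mm mem l).2 = l := by
  induction l generalizing mem with
  | nil => simp [pvChunk]
  | cons p t ih => by_cases h : mem + p.2 > mm <;> simp [pvChunk, h, ih]

theorem pvChunk_snd_le (mm mem : Int) (l : List (Int × Int)) :
    (pvChunk mm mem l).2.length ≤ l.length := by
  conv_rhs => rw [← pvChunk_append mm mem l]
  simp

def pvGreedy (mm : Int) : List (Int × Int) → List (List (Int × Int))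
  | [] => []
  | p :: t => (p :: (pvChunk mm p.2 t).1) :: pvGreedy mm (pvChunk mm p.2 t).2
termination_by l => l.length
decreasing_by
  have := pvChunk_snd_le mm p.2 t
  simp; omega

def pvMsum (l : List (Int × Int)) : Int := (l.map Prod.snd).sum

theorem pvGreedy_nil (mm : Int) : pvGreedy mm [] = [] := by rw [pvGreedy]

theorem pvGreedy_cons (mm : Int) (p : Int × Int) (t : List (Int × Int)) :
    pvGreedy mm (p :: t) = (p :: (pvChunk mm p.2 t).1) :: pvGreedy mm (pvChunk mm p.2 t).2 := by
  rw [pvGreedy]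

-- the processed array is always a true-prefix
def pvPref (p n : Nat) : List Bool := List.replicate p true ++ List.replicate (n - p) false

theorem pvPref_getD_lt {j p n : Nat} (hj : j < p) : (pvPref p n).getD j false = true := by
  unfold pvPref
  rw [List.getD, List.getElem?_append_left (by simpa using hj)]
  simp [hj]

theorem pvPref_getD_self {p n : Nat} (hp : p < n) : (pvPref p n).getD p false = false := by
  unfold pvPref
  rw [List.getD, List.getElem?_append_right (by simp)]
  have h0 : 0 < n - p := by omega
  simp [h0]

theorem pvPref_set {p n : Nat} (hp : p < n) : (pvPref p n).set p true = pvPref (p+1) n := by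
  have h2 : n - p = (n - (p+1)) + 1 := by omega
  simp only [pvPref, h2, List.replicate_succ]
  rw [List.set_append_right _ _ (by simp), List.length_replicate, Nat.sub_self]
  rw [List.set_cons_zero, List.append_cons, ← List.replicate_succ']
  simp [List.replicate_succ]

-- ===== A-side characterisation =====
theorem pvInnerA_pref (xs : List (Int × Int)) (mm : Int) (n : Nat) (hn : n = xs.length) :
    ∀ k j p (batch : List (Int × Int)) (mem : Int), j ≤ p → p ≤ n → n - j ≤ k →
    pvInnerA xs mm n j (pvPref p n) batch mem =
      (pvPref (p + (pvChunk mm mem (xs.drop p)).1.length) n,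
       batch ++ (pvChunk mm mem (xs.drop p)).1,
       mem + pvMsum (pvChunk mm mem (xs.drop p)).1) := by
  intro k
  induction k with
  | zero =>
    intro j p batch mem hjp hpn hk
    have hj : j = n := by omega
    have hp : p = n := by omega
    subst hj; subst hp
    rw [pvInnerA]
    simp [hn, pvChunk, pvMsum]
  | succ k ih =>
    intro j p batch mem hjp hpn hk
    rw [pvInnerA]
    by_cases hjn : j < n
    · simp only [hjn, dif_pos]
      rcases Nat.lt_or_ge j p with hlt | hge
      · rw [pvPref_getD_lt hlt]
        simp only [if_pos]
        exact ih (j+1) p batch mem (by omega) hpn (by omega)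
      · have hjp' : j = p := by omega
        subst hjp'
        rw [pvPref_getD_self (by omega)]
        simp only [Bool.false_eq_true, if_false]
        have hplen : j < xs.length := by omega
        have hget : xs.getD j (0, 0) = xs[j] := by
          simp [List.getD, List.getElem?_eq_getElem hplen]
        have hdrop : xs.drop j = xs[j] :: xs.drop (j+1) := List.drop_eq_getElem_cons hplen
        by_cases hov : mem + xs[j].2 > mm
        · simp only [hget, hov, if_pos]
          rw [hdrop]
          simp [pvChunk, hov, pvMsum]
        · simp only [hget, hov, if_neg, not_false_iff]
          rw [pvPref_set (by omega)]
          rw [ih (j+1) (j+1) (batch ++ [xs[j]]) (mem + xs[j].2) (le_refl _) (by omega) (by omega)]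
          rw [hdrop]
          simp only [pvChunk, hov, if_neg, not_false_iff, Prod.mk.injEq]
          refine ⟨?_, ?_, ?_⟩
          · simp only [List.length_cons]; congr 1; omega
          · simp
          · simp [pvMsum]; ring
    · have hj : j = n := by omega
      have hp : p = n := by omega
      subst hj; subst hp
      simp [hn, pvChunk, pvMsum]

theorem pvOuterA_pref (xs : List (Int × Int)) (mm : Int) (n : Nat) (hn : n = xs.length) :
    ∀ k i p (batches : List (List (Int × Int))), i ≤ p → p ≤ n → n - i ≤ k →
    pvOuterA xs mm n i (pvPref p n) batches = batches ++ pvGreedy mm (xs.drop p) := by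
  intro k
  induction k with
  | zero =>
    intro i p batches hip hpn hk
    have hi : i = n := by omega
    have hp : p = n := by omega
    subst hi; subst hp
    rw [pvOuterA]
    simp [hn, pvGreedy_nil]
  | succ k ih =>
    intro i p batches hip hpn hk
    rw [pvOuterA]
    by_cases hin : i < n
    · simp only [hin, dif_pos]
      rcases Nat.lt_or_ge i p with hlt | hge
      · rw [pvPref_getD_lt hlt]
        simp only [if_pos]
        exact ih (i+1) p batches (by omega) hpn (by omega)
      · have hip' : i = p := by omega
        subst hip'
        rw [pvPref_getD_self (by omega)]
        simp only [Bool.false_eq_true, if_false]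
        have hplen : i < xs.length := by omega
        have hget : xs.getD i (0, 0) = xs[i] := by
          simp [List.getD, List.getElem?_eq_getElem hplen]
        have hdrop : xs.drop i = xs[i] :: xs.drop (i+1) := List.drop_eq_getElem_cons hplen
        rw [hget, pvPref_set (by omega)]
        rw [pvInnerA_pref xs mm n hn (n - i) i (i+1) [xs[i]] xs[i].2 (by omega) (by omega) (by omega)]
        set c := pvChunk mm xs[i].2 (xs.drop (i+1)) with hc
        have hlen : c.1.length + c.2.length = (xs.drop (i+1)).length := by
          conv_rhs => rw [← pvChunk_append mm xs[i].2 (xs.drop (i+1))]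
          simp [hc]
        have hlend : (xs.drop (i+1)).length = n - (i+1) := by simp [hn]
        have hdrop2 : xs.drop (i + 1 + c.1.length) = c.2 := by
          have := pvChunk_append mm xs[i].2 (xs.drop (i+1))
          rw [← hc] at this
          rw [← List.drop_drop, ← this, List.drop_left' rfl]
        rw [ih (i+1) (i+1+c.1.length) (batches ++ [[xs[i]] ++ c.1]) (by omega) (by omega) (by omega)]
        rw [hdrop2, hdrop, pvGreedy_cons, ← hc]
        simp
    · have hi : i = n := by omega
      have hp : p = n := by omega
      subst hi; subst hp
      simp [hn, pvGreedy_nil]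

theorem pvA_greedy (xs : List (Int × Int)) (mm : Int) :
    pvOuterA xs mm xs.length 0 (List.replicate xs.length false) [] = pvGreedy mm xs := by
  have h0 : List.replicate xs.length false = pvPref 0 xs.length := by simp [pvPref]
  rw [h0, pvOuterA_pref xs mm xs.length rfl xs.length 0 0 [] (by omega) (by omega) (by omega)]
  simp

-- ===== B-side characterisation =====
def pvFinish (r : List (List (Int × Int)) × List (Int × Int) × Int) : List (List (Int × Int)) :=
  if r.2.1.isEmpty then r.1 else r.1 ++ [r.2.1]

theorem pvLoopB_spec (mm : Int) :
    ∀ (l : List (Int × Int)) batches (cur : List (Int × Int)) mem, cur ≠ [] →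
    pvFinish (pvLoopB mm l batches cur mem) =
      batches ++ ((cur ++ (pvChunk mm mem l).1) :: pvGreedy mm (pvChunk mm mem l).2) := by
  intro l
  induction l with
  | nil =>
    intro batches cur mem hcur
    simp [pvFinish, pvLoopB, pvChunk, pvGreedy_nil, hcur]
  | cons p t ih =>
    intro batches cur mem hcur
    have hce : cur.isEmpty = false := by simp [hcur]
    simp only [pvLoopB, hce, Bool.false_eq_true, if_false]
    by_cases hfit : mem + p.2 ≤ mm
    · simp only [hfit, if_pos]
      rw [ih batches (cur ++ [p]) (mem + p.2) (by simp)]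
      have hov : ¬ mem + p.2 > mm := by omega
      simp [pvChunk, hov]
    · simp only [hfit, if_neg, not_false_iff]
      rw [ih (batches ++ [cur]) [p] p.2 (by simp)]
      have hov : mem + p.2 > mm := by omega
      simp [pvChunk, hov, pvGreedy_cons]

theorem pvB_greedy (xs : List (Int × Int)) (mm : Int) :
    pvFinish (pvLoopB mm xs [] [] 0) = pvGreedy mm xs := by
  cases xs with
  | nil => simp [pvFinish, pvLoopB, pvGreedy_nil]
  | cons p t =>
    simp only [pvLoopB, List.isEmpty_nil, if_pos]
    rw [pvLoopB_spec mm t [] [p] p.2 (by simp)]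
    simp [pvGreedy_cons]

-- ===== VERDICT (by name: the statement is the Claim_ definition above) =====
theorem get_optimal_batches_spec : Claim_equal_get_optimal_batches := by
  intro data_points max_memory batch_overhead _hdom
  unfold Spec_get_optimal_batches get_optimal_batches
  have hb : get_optimal_batches_alt data_points max_memory batch_overhead =
      pvFinish (pvLoopB max_memory (PySem.List.sorted data_points (fun x => x.1) true) [] [] 0) := rfl
  rw [hb, pvA_greedy, pvB_greedy]
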